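-- pv_equiv track=rewrite | github.com/ddaanial/Human-Activity-Recognition | prepare_WISDM.py | makeit
-- ===== SOURCE A (Python) =====
-- def makeit(sub_data):
--     padding_value = [0, 0, 0]
--     padded_list = []
--
--     # Determine the number of groups required
--     num_groups = len(sub_data) // 150 + (len(sub_data) % 150 != 0)
--
--     # Pad each sublist in my_list and add it to the padded_list
--     for i in range(num_groups * 150):
--         if i < len(sub_data):
--             current_sublist = sub_data[i]
--         else:
--             current_sublist = padding_value
--         padded_list.append(current_sublist)
--
--     # Reshape the padded_list into groups of size 150 x 3
--     final_list = [padded_list[i:i+150] for i in range(0, len(padded_list), 150)]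
--     return final_list
-- ===== SOURCE B (Python) =====
-- def makeit(sub_data):
--     padding_value = [0, 0, 0]
--     num_groups = (len(sub_data) + 149) // 150
--     result = []
--     for g in range(num_groups):
--         group = list(sub_data[g * 150:(g + 1) * 150])
--         group += [padding_value] * (150 - len(group))
--         result.append(group)
--     return result
-- ===== Notes on version B (the rewrite author's own statement) =====
-- stated objective: simpler
-- what changed: Replaces A's two passes (build one flat padded list of num_groups*150 sublists, then reshape it by slicing) with a single per-group pass that slices each 150-element chunk directly from the input and pads only the final short chunk.
import Mathlib
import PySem

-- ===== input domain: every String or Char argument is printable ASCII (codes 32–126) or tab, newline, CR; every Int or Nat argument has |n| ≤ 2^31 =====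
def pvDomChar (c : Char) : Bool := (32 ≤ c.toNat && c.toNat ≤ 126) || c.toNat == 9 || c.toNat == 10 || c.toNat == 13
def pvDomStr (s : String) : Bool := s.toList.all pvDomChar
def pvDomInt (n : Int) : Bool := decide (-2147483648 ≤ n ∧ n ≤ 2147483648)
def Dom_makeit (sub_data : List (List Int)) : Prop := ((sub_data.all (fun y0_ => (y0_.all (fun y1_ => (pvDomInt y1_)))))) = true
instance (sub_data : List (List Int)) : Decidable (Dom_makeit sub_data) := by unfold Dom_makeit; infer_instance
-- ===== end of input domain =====

-- B replaces A's pad-everything-then-reshape two-pass shape with a single per-group pass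
-- that slices each 150-chunk directly from the input and pads only the final short chunk (objective: simpler).

-- ===== PORT A =====
-- literal port of A: build the flat padded list element by element over range(num_groups*150),
-- then reshape it with slices over range(0, len, 150).  sub_data[i] is guarded by i < len(sub_data),
-- so pyGetD (with the padding value as never-used default) is exact here.
def makeit (sub_data : List (List Int)) : List (List (List Int)) :=
  let padding_value : List Int := [0, 0, 0]
  let n : Int := (sub_data.length : Int)
  let num_groups : Int :=
    PySem.Int.floordiv n 150 + (if PySem.Int.mod n 150 ≠ 0 then 1 else 0)
  let padded_list : List (List Int) :=
    (PySem.List.pyRange 0 (num_groups * 150) 1).foldl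
      (fun acc i =>
        acc ++ [if i < n then PySem.List.pyGetD sub_data i padding_value else padding_value]) []
  (PySem.List.pyRange 0 (padded_list.length : Int) 150).map
    (fun i => PySem.List.slice padded_list (some i) (some (i + 150)))

-- ===== PORT B =====
-- literal port of B: num_groups = (len+149)//150; for each g, slice the chunk and pad it to 150.
def makeit_alt (sub_data : List (List Int)) : List (List (List Int)) :=
  let padding_value : List Int := [0, 0, 0]
  let num_groups : Int := PySem.Int.floordiv ((sub_data.length : Int) + 149) 150
  (PySem.List.pyRange 0 num_groups 1).foldl
    (fun acc g =>
      let group := PySem.List.slice sub_data (some (g * 150)) (some ((g + 1) * 150))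
      acc ++ [group ++ List.replicate (150 - group.length) padding_value]) []

-- ===== PRECONDITION & SPEC =====
def Spec_makeit (sub_data : List (List Int)) (out : List (List (List Int))) : Prop := out = makeit_alt sub_data
instance (sub_data : List (List Int)) (out : List (List (List Int))) : Decidable (Spec_makeit sub_data out) := by unfold Spec_makeit; infer_instance

-- ===== CLAIM (what is proved, stated in full; the proofs are below) =====
def Claim_equal_makeit : Prop := ∀ (sub_data : List (List Int)), Dom_makeit sub_data → Spec_makeit sub_data (makeit sub_data)

-- ===== LEMMAS AND PROOFS =====

-- A's flat padded list is the input followed by padding up to length M.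
theorem pad_flat {α : Type} (xs : List α) (pad : α) (M : Nat) (h : xs.length ≤ M) :
    (List.range M).map (fun k => if k < xs.length then xs.getD k pad else pad)
      = xs ++ List.replicate (M - xs.length) pad := by
  apply List.ext_getElem
  · simp; omega
  · intro i h1 h2
    simp only [List.getElem_map, List.getElem_range]
    by_cases hi : i < xs.length
    · rw [if_pos hi, List.getElem_append_left hi, List.getD_eq_getElem _ _ hi]
    · rw [if_neg hi, List.getElem_append_right (by omega), List.getElem_replicate]

-- slicing a 150-chunk out of the padded list = the raw chunk padded up to 150.
theorem chunk_pad {α : Type} (xs : List α) (pad : α) (j k : Nat)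
    (h : j + 150 ≤ xs.length + k) :
    List.take 150 (List.drop j (xs ++ List.replicate k pad))
      = List.take 150 (List.drop j xs)
        ++ List.replicate (150 - (List.take 150 (List.drop j xs)).length) pad := by
  rw [List.drop_append, List.drop_replicate, List.take_append, List.take_replicate]
  congr 1
  simp only [List.length_take, List.length_drop]
  congr 1
  omega

-- ===== VERDICT (by name: the statement is the Claim_ definition above) =====
theorem makeit_spec : Claim_equal_makeit := by
  intro sub_data _
  unfold Spec_makeit makeit makeit_alt
  set n : Nat := sub_data.length with hn
  set m : Nat := (n + 149) / 150 with hm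
  set pad : List Int := [0, 0, 0] with hpad
  -- both group counts are m
  have hGA : PySem.Int.floordiv (n : Int) 150
      + (if PySem.Int.mod (n : Int) 150 ≠ 0 then 1 else 0) = (m : Int) := by
    rw [PySem.Int.floordiv_eq_ediv_of_pos (by norm_num),
        PySem.Int.mod_eq_emod_of_pos (by norm_num)]
    split_ifs with hz <;> omega
  have hGB : PySem.Int.floordiv ((n : Int) + 149) 150 = (m : Int) := by
    rw [PySem.Int.floordiv_eq_ediv_of_pos (by norm_num)]; omega
  have hnle : n ≤ m * 150 := by omega
  simp only [hGA, hGB, PySem.List.foldl_append_singleton_eq_map, List.nil_append]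
  -- A's padded list
  have hcast : (m : Int) * 150 = ((m * 150 : Nat) : Int) := by push_cast; ring
  have hpadded :
      (PySem.List.pyRange 0 ((m : Int) * 150) 1).map
        (fun i => if i < (n : Int) then PySem.List.pyGetD sub_data i pad else pad)
      = sub_data ++ List.replicate (m * 150 - n) pad := by
    rw [hcast, PySem.List.pyRange_one, List.map_map]
    simp only [Int.sub_zero, Int.toNat_natCast, Function.comp_def, Int.zero_add]
    rw [← pad_flat sub_data pad (m * 150) hnle]
    apply List.map_congr_left
    intro k _
    by_cases hk : k < n
    · rw [if_pos (by exact_mod_cast hk), if_pos hk, PySem.List.pyGetD_natCast]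
    · rw [if_neg (by exact_mod_cast hk), if_neg hk]
  rw [hpadded]
  have hlen : ((sub_data ++ List.replicate (m * 150 - n) pad).length : Int)
      = ((m * 150 : Nat) : Int) := by
    simp only [List.length_append, List.length_replicate, ← hn]; push_cast; omega
  rw [hlen]
  -- A's outer range with step 150 enumerates 150*g for g < m
  rw [PySem.List.pyRange_of_pos 0 ((m * 150 : Nat) : Int) (by norm_num)]
  have hcnt : (if (0 : Int) < ((m * 150 : Nat) : Int)
      then ((((m * 150 : Nat) : Int) - 0 + 150 - 1) / 150).toNat else 0) = m := by
    split_ifs with hpos <;> omega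
  rw [hcnt, List.map_map]
  -- B's outer range
  rw [PySem.List.pyRange_one, List.map_map]
  simp only [Int.sub_zero, Int.toNat_natCast, Function.comp_def, Int.zero_add]
  -- pointwise over g < m
  apply List.map_congr_left
  intro g hg
  rw [List.mem_range] at hg
  have e1 : 150 * (g : Int) = ((150 * g : Nat) : Int) := by push_cast; ring
  have e2 : ((150 * g : Nat) : Int) + 150 = ((150 * g : Nat) : Int) + ((150 : Nat) : Int) := by
    norm_num
  have e3 : (g : Int) * 150 = ((g * 150 : Nat) : Int) := by push_cast; ring
  have e4 : ((g : Int) + 1) * 150 = ((g * 150 : Nat) : Int) + ((150 : Nat) : Int) := by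
    push_cast; ring
  rw [e1, e2, PySem.List.slice_natCast_add, e3, e4, PySem.List.slice_natCast_add,
      Nat.mul_comm 150 g]
  exact chunk_pad sub_data pad (g * 150) (m * 150 - n) (by omega)
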